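-- pv_equiv track=rewrite | github.com/saagpatel/GithubRepoAuditor | src/intervention_ledger.py | _campaign_follow_through
-- ===== SOURCE A (Python) =====
-- from typing import Any
--
-- def _campaign_follow_through(repo: str, action_rows: list[dict[str, Any]], outcome_rows: list[dict[str, Any]]) -> str:
--     repo_campaigns: set[str] = set()
--     for row in action_rows:
--         names = {
--             str(row.get("repo") or "").split("/")[-1],
--             str(row.get("repo_id") or "").split("/")[-1],
--             str(row.get("repo_full_name") or "").split("/")[-1],
--         }
--         if repo in names:
--             repo_campaigns.add(str(row.get("campaign_type") or ""))
--     repo_campaigns.discard("")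
--     if not repo_campaigns:
--         return "not-applicable"
--     relevant = [row for row in outcome_rows if str(row.get("campaign_type") or "") in repo_campaigns]
--     if not relevant:
--         return "insufficient-evidence"
--     states = {str(row.get("monitoring_state") or "") for row in relevant}
--     if states & {"drift-returned", "reopened"}:
--         return "relapsing"
--     if "holding-clean" in states and not (states & {"rollback-watch", "monitor-now"}):
--         return "helping"
--     if states:
--         return "mixed"
--     return "insufficient-evidence"
-- ===== SOURCE B (Python) =====
-- from typing import Any
--
-- # Verdict lattice: N (no evidence) < O (other) < H (helping) / B (blocker) < M (mixed) < R (relapse).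
-- _VERDICT = {"N": "insufficient-evidence", "O": "mixed", "H": "helping",
--             "B": "mixed", "M": "mixed", "R": "relapsing"}
--
-- def _tail(value: Any) -> str:
--     return str(value or "").split("/")[-1]
--
-- def _matches(repo: str, row: dict) -> bool:
--     return repo in (_tail(row.get("repo")), _tail(row.get("repo_id")), _tail(row.get("repo_full_name")))
--
-- def _code(state: str) -> str:
--     if state in ("drift-returned", "reopened"):
--         return "R"
--     if state == "holding-clean":
--         return "H"
--     if state in ("rollback-watch", "monitor-now"):
--         return "B"
--     return "O"
--
-- def _join(a: str, b: str) -> str: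
--     if a == "R" or b == "R":
--         return "R"
--     if a == "N":
--         return b
--     if b == "N":
--         return a
--     if a == b:
--         return a
--     if a == "O":
--         return b
--     if b == "O":
--         return a
--     return "M"
--
-- def _campaign_follow_through(repo: str, action_rows: list[dict[str, Any]], outcome_rows: list[dict[str, Any]]) -> str:
--     if not any(_matches(repo, row) and str(row.get("campaign_type") or "") for row in action_rows):
--         return "not-applicable"
--     acc = "N"
--     for row in outcome_rows:
--         c = str(row.get("campaign_type") or "")
--         if c and any(_matches(repo, r) and str(r.get("campaign_type") or "") == c for r in action_rows):
--             acc = _join(acc, _code(str(row.get("monitoring_state") or "")))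
--     return _VERDICT[acc]
-- ===== Notes on version B (the rewrite author's own statement) =====
-- stated objective: alternative
-- what changed: B builds no repo_campaigns set and no states set at all: each outcome row's relevance is decided by scanning action_rows directly, and the verdict is computed by folding the rows' state codes through a six-element join-semilattice (lookup-table join) whose top-level value maps straight to the answer.
import Mathlib
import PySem

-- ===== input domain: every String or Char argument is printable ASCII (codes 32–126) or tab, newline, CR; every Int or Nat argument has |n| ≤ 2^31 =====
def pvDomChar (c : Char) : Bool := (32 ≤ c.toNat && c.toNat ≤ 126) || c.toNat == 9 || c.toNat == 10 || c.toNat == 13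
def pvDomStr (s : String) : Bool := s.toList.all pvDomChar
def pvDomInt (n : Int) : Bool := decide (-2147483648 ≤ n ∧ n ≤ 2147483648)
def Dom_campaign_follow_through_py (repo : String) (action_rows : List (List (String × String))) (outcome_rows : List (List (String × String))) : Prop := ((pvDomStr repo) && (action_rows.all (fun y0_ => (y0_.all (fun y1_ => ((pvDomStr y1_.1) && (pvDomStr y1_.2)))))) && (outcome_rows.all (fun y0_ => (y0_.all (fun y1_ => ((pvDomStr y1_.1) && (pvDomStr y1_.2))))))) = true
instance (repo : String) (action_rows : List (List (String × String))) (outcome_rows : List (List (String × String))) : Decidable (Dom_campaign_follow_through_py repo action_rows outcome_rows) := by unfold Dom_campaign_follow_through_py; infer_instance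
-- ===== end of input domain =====

-- B drops both of A's sets: relevance of an outcome row is decided by scanning action_rows directly, and the verdict is a fold through a six-element join-semilattice (alternative decomposition; return value only).


-- ===== PORT A =====
-- str(row.get(k) or ""): values are strings, missing key → None → ""; "" stays "" — exact as Option.getD ""
def pvGet (row : List (String × String)) (k : String) : String :=
  ((PySem.Dict.mk row).get? k).getD ""

-- str.split("/")[-1] (split of a non-empty separator never returns [], so the [-1] never raises)
def pvLastSeg (s : String) : String :=
  PySem.List.pyGetD ((PySem.Str.split? s "/").getD []) (-1) ""

-- A's first loop: build repo_campaigns, then discard ""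
def pvRepoCampaigns (repo : String) (action_rows : List (List (String × String))) : PySem.Set String :=
  PySem.Set.discard
    (action_rows.foldl (fun s row =>
      let names : PySem.Set String := PySem.Set.ofList
        [pvLastSeg (pvGet row "repo"), pvLastSeg (pvGet row "repo_id"), pvLastSeg (pvGet row "repo_full_name")]
      if PySem.Set.contains names repo then PySem.Set.add s (pvGet row "campaign_type") else s)
      PySem.Set.empty)
    ""

def campaign_follow_through_py (repo : String) (action_rows : List (List (String × String))) (outcome_rows : List (List (String × String))) : String :=
  let rc := pvRepoCampaigns repo action_rows
  if rc = [] then "not-applicable"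
  else
    let relevant := outcome_rows.filter (fun row => PySem.Set.contains rc (pvGet row "campaign_type"))
    if relevant = [] then "insufficient-evidence"
    else
      let states : PySem.Set String := PySem.Set.ofList (relevant.map (fun row => pvGet row "monitoring_state"))
      if PySem.Set.inter states (PySem.Set.ofList ["drift-returned", "reopened"]) ≠ [] then "relapsing"
      else if "holding-clean" ∈ states ∧ PySem.Set.inter states (PySem.Set.ofList ["rollback-watch", "monitor-now"]) = [] then "helping"
      else if states ≠ [] then "mixed"
      else "insufficient-evidence"

-- ===== PORT B =====
-- _matches: repo in (tail(repo), tail(repo_id), tail(repo_full_name))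
def pvMatches (repo : String) (row : List (String × String)) : Bool :=
  repo == pvLastSeg (pvGet row "repo") || repo == pvLastSeg (pvGet row "repo_id") || repo == pvLastSeg (pvGet row "repo_full_name")

-- _code: state → lattice element
def pvCode (state : String) : String :=
  if state == "drift-returned" || state == "reopened" then "R"
  else if state == "holding-clean" then "H"
  else if state == "rollback-watch" || state == "monitor-now" then "B"
  else "O"

-- _join: join of the six-element semilattice
def pvJoin (a b : String) : String :=
  if a == "R" || b == "R" then "R"
  else if a == "N" then b
  else if b == "N" then a
  else if a == b then a
  else if a == "O" then b
  else if b == "O" then a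
  else "M"

-- the per-row relevance test of B's loop: c nonempty and some matching action row carries campaign c
def pvRelevantB (repo : String) (action_rows : List (List (String × String))) (row : List (String × String)) : Bool :=
  let c := pvGet row "campaign_type"
  c != "" && action_rows.any (fun r => pvMatches repo r && pvGet r "campaign_type" == c)

-- _VERDICT[acc] (acc is always one of the six keys, so the KeyError default "" is unreachable)
def pvVerdict (a : String) : String :=
  ((PySem.Dict.mk [("N","insufficient-evidence"),("O","mixed"),("H","helping"),("B","mixed"),("M","mixed"),("R","relapsing")]).get? a).getD ""

def campaign_follow_through_py_alt (repo : String) (action_rows : List (List (String × String))) (outcome_rows : List (List (String × String))) : String :=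
  if !(action_rows.any (fun row => pvMatches repo row && pvGet row "campaign_type" != "")) then "not-applicable"
  else
    pvVerdict (outcome_rows.foldl (fun acc row =>
      if pvRelevantB repo action_rows row then pvJoin acc (pvCode (pvGet row "monitoring_state")) else acc) "N")

-- ===== PRECONDITION & SPEC =====
def Spec_campaign_follow_through_py (repo : String) (action_rows : List (List (String × String))) (outcome_rows : List (List (String × String))) (out : String) : Prop := out = campaign_follow_through_py_alt repo action_rows outcome_rows
instance (repo : String) (action_rows : List (List (String × String))) (outcome_rows : List (List (String × String))) (out : String) : Decidable (Spec_campaign_follow_through_py repo action_rows outcome_rows out) := by unfold Spec_campaign_follow_through_py; infer_instance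

-- ===== CLAIM (what is proved, stated in full; the proofs are below) =====
def Claim_equal_campaign_follow_through_py : Prop := ∀ (repo : String) (action_rows : List (List (String × String))) (outcome_rows : List (List (String × String))), Dom_campaign_follow_through_py repo action_rows outcome_rows → Spec_campaign_follow_through_py repo action_rows outcome_rows (campaign_follow_through_py repo action_rows outcome_rows)

-- ===== LEMMAS AND PROOFS =====

-- the six lattice elements
def pvValidJ (a : String) : Prop := a = "N" ∨ a = "O" ∨ a = "H" ∨ a = "B" ∨ a = "M" ∨ a = "R"

-- closed form of B's fold (proof-only)
def pvTarget (r h b any : Bool) : String :=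
  if r then "R" else if h && b then "M" else if h then "H" else if b then "B" else if any then "O" else "N"

theorem pvJoin_N_left (b : String) : pvJoin "N" b = b := by
  by_cases hb : b = "R" <;> simp [pvJoin, hb]

theorem pvJoin_N_right (a : String) : pvJoin a "N" = a := by
  by_cases h1 : a = "R"
  · simp [pvJoin, h1]
  · by_cases h2 : a = "N" <;> simp [pvJoin, h1, h2]

theorem pvValidJ_code (s : String) : pvValidJ (pvCode s) := by
  unfold pvCode pvValidJ; split_ifs <;> simp

theorem pvValidJ_join {a b : String} (ha : pvValidJ a) (hb : pvValidJ b) : pvValidJ (pvJoin a b) := by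
  unfold pvValidJ at *
  rcases ha with rfl|rfl|rfl|rfl|rfl|rfl <;> rcases hb with rfl|rfl|rfl|rfl|rfl|rfl <;> decide

theorem pvJoin_assoc {a b c : String} (ha : pvValidJ a) (hb : pvValidJ b) (hc : pvValidJ c) :
    pvJoin (pvJoin a b) c = pvJoin a (pvJoin b c) := by
  unfold pvValidJ at *
  rcases ha with rfl|rfl|rfl|rfl|rfl|rfl <;> rcases hb with rfl|rfl|rfl|rfl|rfl|rfl <;>
    rcases hc with rfl|rfl|rfl|rfl|rfl|rfl <;> decide

-- every accumulator reached by B's fold is a lattice element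
theorem pvFold_valid {α : Type} (p : α → Bool) (st : α → String) (l : List α) {a : String} (ha : pvValidJ a) :
    pvValidJ (l.foldl (fun acc r => if p r then pvJoin acc (pvCode (st r)) else acc) a) := by
  induction l generalizing a with
  | nil => exact ha
  | cons x t ih =>
    simp only [List.foldl_cons]
    by_cases hp : p x
    · rw [if_pos hp]; exact ih (pvValidJ_join ha (pvValidJ_code (st x)))
    · rw [if_neg hp]; exact ih ha

-- homomorphism: the fold from any valid accumulator is the join with the fold from "N"
theorem pvFold_hom {α : Type} (p : α → Bool) (st : α → String) (l : List α) {a : String} (ha : pvValidJ a) :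
    l.foldl (fun acc r => if p r then pvJoin acc (pvCode (st r)) else acc) a
      = pvJoin a (l.foldl (fun acc r => if p r then pvJoin acc (pvCode (st r)) else acc) "N") := by
  induction l generalizing a with
  | nil => simp [pvJoin_N_right]
  | cons x t ih =>
    simp only [List.foldl_cons]
    by_cases hp : p x
    · simp only [hp, if_true, pvJoin_N_left]
      rw [ih (pvValidJ_join ha (pvValidJ_code (st x))), ih (pvValidJ_code (st x)),
        pvJoin_assoc ha (pvValidJ_code (st x)) (pvFold_valid p st t (by left; rfl))]
    · simp only [if_neg hp]
      exact ih ha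

theorem pvJoin_code_target (s : String) (r h b any : Bool) :
    pvJoin (pvCode s) (pvTarget r h b any)
      = pvTarget ((s == "drift-returned" || s == "reopened") || r) ((s == "holding-clean") || h)
          ((s == "rollback-watch" || s == "monitor-now") || b) true := by
  by_cases h1 : (s == "drift-returned" || s == "reopened") = true
  · have e : pvCode s = "R" := by simp [pvCode, h1]
    rw [e]
    cases r <;> cases h <;> cases b <;> cases any <;> simp [h1, pvTarget, pvJoin]
  · by_cases h2 : (s == "holding-clean") = true
    · have e : pvCode s = "H" := by
        have : (s == "drift-returned" || s == "reopened") = false := by simp_all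
        simp [pvCode, this, h2]
      rw [e]
      have h3 : (s == "rollback-watch" || s == "monitor-now") = false := by simp_all
      cases r <;> cases h <;> cases b <;> cases any <;> simp [h1, h2, h3, pvTarget, pvJoin]
    · by_cases h3 : (s == "rollback-watch" || s == "monitor-now") = true
      · have e : pvCode s = "B" := by
          have e1 : (s == "drift-returned" || s == "reopened") = false := by simp_all
          have e2 : (s == "holding-clean") = false := by simp_all
          simp [pvCode, e1, e2, h3]
        rw [e]
        cases r <;> cases h <;> cases b <;> cases any <;> simp [h1, h2, h3, pvTarget, pvJoin]
      · have e : pvCode s = "O" := by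
          simp only [Bool.not_eq_true] at h1 h2 h3
          simp [pvCode, h1, h2, h3]
        rw [e]
        cases r <;> cases h <;> cases b <;> cases any <;> simp [h1, h2, h3, pvTarget, pvJoin]

-- closed form of B's fold: the four presence flags over the whole list
theorem pvFold_char {α : Type} (p : α → Bool) (st : α → String) (l : List α) :
    l.foldl (fun acc r => if p r then pvJoin acc (pvCode (st r)) else acc) "N"
      = pvTarget (l.any (fun r => p r && (st r == "drift-returned" || st r == "reopened")))
          (l.any (fun r => p r && (st r == "holding-clean")))
          (l.any (fun r => p r && (st r == "rollback-watch" || st r == "monitor-now")))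
          (l.any p) := by
  induction l with
  | nil => rfl
  | cons x t ih =>
    simp only [List.foldl_cons, List.any_cons]
    by_cases hp : p x
    · rw [if_pos hp, pvJoin_N_left, pvFold_hom p st t (pvValidJ_code (st x)), ih,
        pvJoin_code_target]
      simp [hp]
    · rw [if_neg hp, ih]
      simp [hp]

-- membership in the first loop's accumulating set
theorem pvMem_foldl_add {α : Type} (l : List α) (p : α → Bool) (f : α → String) (s0 : PySem.Set String) (x : String) :
    x ∈ l.foldl (fun s r => if p r then PySem.Set.add s (f r) else s) s0 ↔
      x ∈ s0 ∨ ∃ r ∈ l, p r = true ∧ f r = x := by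
  induction l generalizing s0 with
  | nil => simp
  | cons y t ih =>
    simp only [List.foldl_cons, List.mem_cons]
    by_cases hp : p y
    · rw [if_pos hp, ih]
      simp only [PySem.Set.mem_add]
      constructor
      · rintro (⟨h | h⟩ | ⟨r, hr, h1, h2⟩)
        · exact Or.inl h
        · exact Or.inr ⟨y, Or.inl rfl, hp, h.symm⟩
        · exact Or.inr ⟨r, Or.inr hr, h1, h2⟩
      · rintro (h | ⟨r, hr | hr, h1, h2⟩)
        · exact Or.inl (Or.inl h)
        · exact Or.inl (Or.inr (by rw [hr] at h2; exact h2.symm))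
        · exact Or.inr ⟨r, hr, h1, h2⟩
    · rw [if_neg hp, ih]
      constructor
      · rintro (h | ⟨r, hr, h1, h2⟩)
        · exact Or.inl h
        · exact Or.inr ⟨r, Or.inr hr, h1, h2⟩
      · rintro (h | ⟨r, hr | hr, h1, h2⟩)
        · exact Or.inl h
        · exact absurd h1 (by rw [hr]; simp [hp])
        · exact Or.inr ⟨r, hr, h1, h2⟩

-- A's "repo in names" equals B's _matches
theorem pvContains_names (repo : String) (row : List (String × String)) :
    PySem.Set.contains (PySem.Set.ofList
      [pvLastSeg (pvGet row "repo"), pvLastSeg (pvGet row "repo_id"), pvLastSeg (pvGet row "repo_full_name")]) repo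
      = pvMatches repo row := by
  rw [Bool.eq_iff_iff, PySem.Set.contains_iff, PySem.Set.mem_ofList]
  simp [pvMatches]
  tauto

-- membership in repo_campaigns, characterised over the rows
theorem pvMem_rc (repo x : String) (action_rows : List (List (String × String))) :
    x ∈ pvRepoCampaigns repo action_rows ↔
      x ≠ "" ∧ ∃ row ∈ action_rows, pvMatches repo row = true ∧ pvGet row "campaign_type" = x := by
  unfold pvRepoCampaigns
  rw [PySem.Set.mem_discard]
  simp only [pvContains_names]
  rw [pvMem_foldl_add]
  simp only [PySem.Set.empty, List.not_mem_nil, false_or]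
  tauto

-- A's filter predicate equals B's per-row relevance test
theorem pvRelevantB_eq (repo : String) (action_rows : List (List (String × String))) (row : List (String × String)) :
    pvRelevantB repo action_rows row
      = PySem.Set.contains (pvRepoCampaigns repo action_rows) (pvGet row "campaign_type") := by
  rw [Bool.eq_iff_iff, PySem.Set.contains_iff, pvMem_rc]
  simp only [pvRelevantB, Bool.and_eq_true, bne_iff_ne, ne_eq, List.any_eq_true, beq_iff_eq]

-- "not-applicable" guards agree
theorem pvRc_nil_iff (repo : String) (action_rows : List (List (String × String))) :
    pvRepoCampaigns repo action_rows = [] ↔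
      (action_rows.any (fun row => pvMatches repo row && pvGet row "campaign_type" != "")) = false := by
  rw [List.eq_nil_iff_forall_not_mem]
  simp only [pvMem_rc, Bool.eq_false_iff, ne_eq, List.any_eq_true, Bool.and_eq_true, bne_iff_ne]
  constructor
  · rintro h ⟨row, hrow, hm, hc⟩
    exact h (pvGet row "campaign_type") ⟨hc, row, hrow, hm, rfl⟩
  · rintro h x ⟨hx, row, hrow, hm, hc⟩
    exact h ⟨row, hrow, hm, by rw [hc]; exact hx⟩

-- the set of monitoring states of the relevant rows, element-wise
theorem pvMem_states_iff {α : Type} (l : List α) (p : α → Bool) (st : α → String) (x : String) :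
    x ∈ PySem.Set.ofList ((l.filter p).map st) ↔ ∃ r ∈ l, p r = true ∧ st r = x := by
  simp only [PySem.Set.mem_ofList, List.mem_map, List.mem_filter]
  constructor
  · rintro ⟨a, ⟨h1, h2⟩, h3⟩
    exact ⟨a, h1, h2, h3⟩
  · rintro ⟨a, h1, h2, h3⟩
    exact ⟨a, ⟨h1, h2⟩, h3⟩

-- emptiness of 'states & S' as a universal statement over the rows
theorem pvInter_eq_nil_iff {α : Type} (l : List α) (p : α → Bool) (st : α → String) (S : List String) :
    (PySem.Set.ofList ((l.filter p).map st)).inter (PySem.Set.ofList S) = [] ↔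
      ∀ r ∈ l, p r = true → st r ∉ S := by
  constructor
  · intro h r hr hp hS
    have hmem : st r ∈ (PySem.Set.ofList ((l.filter p).map st)).inter (PySem.Set.ofList S) :=
      (PySem.Set.mem_inter _ _ _).mpr ⟨(pvMem_states_iff l p st _).mpr ⟨r, hr, hp, rfl⟩,
        (PySem.Set.mem_ofList _ _).mpr hS⟩
    rw [h] at hmem
    simp at hmem
  · intro h
    rw [List.eq_nil_iff_forall_not_mem]
    intro x hx
    obtain ⟨h1, h2⟩ := (PySem.Set.mem_inter _ _ _).mp hx
    obtain ⟨r, hr, hp, rfl⟩ := (pvMem_states_iff l p st _).mp h1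
    exact h r hr hp ((PySem.Set.mem_ofList _ _).mp h2)

-- emptiness of 'states' as a universal statement over the rows
theorem pvStates_eq_nil_iff {α : Type} (l : List α) (p : α → Bool) (st : α → String) :
    PySem.Set.ofList ((l.filter p).map st) = [] ↔ ∀ r ∈ l, ¬ p r = true := by
  constructor
  · intro h r hr hp
    have hmem := (pvMem_states_iff l p st (st r)).mpr ⟨r, hr, hp, rfl⟩
    rw [h] at hmem
    simp at hmem
  · intro h
    rw [List.eq_nil_iff_forall_not_mem]
    intro x hx
    obtain ⟨r, hr, hp, rfl⟩ := (pvMem_states_iff l p st _).mp hx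
    exact h r hr hp

-- literal evaluations of the closed form and of the verdict table
theorem pvTarget_R (h b a : Bool) : pvTarget true h b a = "R" := rfl
theorem pvTarget_M (a : Bool) : pvTarget false true true a = "M" := rfl
theorem pvTarget_H (a : Bool) : pvTarget false true false a = "H" := rfl
theorem pvTarget_B (a : Bool) : pvTarget false false true a = "B" := rfl
theorem pvTarget_O : pvTarget false false false true = "O" := rfl
theorem pvTarget_N : pvTarget false false false false = "N" := rfl
theorem pvVerdict_R : pvVerdict "R" = "relapsing" := rfl
theorem pvVerdict_M : pvVerdict "M" = "mixed" := rfl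
theorem pvVerdict_H : pvVerdict "H" = "helping" := rfl
theorem pvVerdict_B : pvVerdict "B" = "mixed" := rfl
theorem pvVerdict_O : pvVerdict "O" = "mixed" := rfl
theorem pvVerdict_N : pvVerdict "N" = "insufficient-evidence" := rfl

-- ===== VERDICT (by name: the statement is the Claim_ definition above) =====
theorem campaign_follow_through_py_spec : Claim_equal_campaign_follow_through_py := by
  intro repo action_rows outcome_rows _
  unfold Spec_campaign_follow_through_py campaign_follow_through_py campaign_follow_through_py_alt
  set rc := pvRepoCampaigns repo action_rows with hrc
  by_cases h0 : rc = []
  · have := (pvRc_nil_iff repo action_rows).mp h0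
    simp [h0, this]
  · have hg : (action_rows.any (fun row => pvMatches repo row && pvGet row "campaign_type" != "")) = true := by
      by_contra h
      exact h0 ((pvRc_nil_iff repo action_rows).mpr (Bool.eq_false_iff.mpr h))
    simp only [hg, Bool.not_true, if_false, h0, Bool.false_eq_true]
    simp only [pvRelevantB_eq, ← hrc]
    rw [pvFold_char (fun row => PySem.Set.contains rc (pvGet row "campaign_type")) (fun row => pvGet row "monitoring_state")]
    set q : List (String × String) → Bool := fun row => PySem.Set.contains rc (pvGet row "campaign_type") with hq
    by_cases hA : ∃ x ∈ outcome_rows, pvGet x "campaign_type" ∈ rc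
    · have bA : outcome_rows.any q = true := by
        simp only [List.any_eq_true, hq, PySem.Set.contains_iff]
        exact hA
      have hrel : outcome_rows.filter q ≠ [] := by
        simp only [ne_eq, List.filter_eq_nil_iff]
        obtain ⟨r, hr, h⟩ := hA
        exact fun hall => hall r hr (by simpa [hq] using h)
      have hSne : PySem.Set.ofList ((outcome_rows.filter q).map (fun row => pvGet row "monitoring_state")) ≠ [] := by
        rw [ne_eq, pvStates_eq_nil_iff]
        obtain ⟨r, hr, h⟩ := hA
        exact fun hall => hall r hr (by simpa [hq] using h)
      by_cases hR : ∃ x ∈ outcome_rows, pvGet x "campaign_type" ∈ rc ∧ (pvGet x "monitoring_state" = "drift-returned" ∨ pvGet x "monitoring_state" = "reopened")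
      · have bR : (outcome_rows.any fun r => q r && (pvGet r "monitoring_state" == "drift-returned" || pvGet r "monitoring_state" == "reopened")) = true := by
          simp only [List.any_eq_true, Bool.and_eq_true, Bool.or_eq_true, beq_iff_eq, hq, PySem.Set.contains_iff]
          exact hR
        have hRne : PySem.Set.inter (PySem.Set.ofList ((outcome_rows.filter q).map (fun row => pvGet row "monitoring_state"))) (PySem.Set.ofList ["drift-returned", "reopened"]) ≠ [] := by
          rw [ne_eq, pvInter_eq_nil_iff]
          obtain ⟨r, hr, h1, h2⟩ := hR
          intro hall
          exact hall r hr (by simpa [hq] using h1) (by rcases h2 with h | h <;> simp [h])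
        rw [if_neg hrel, if_pos hRne, bR, pvTarget_R, pvVerdict_R]
      · have bR : (outcome_rows.any fun r => q r && (pvGet r "monitoring_state" == "drift-returned" || pvGet r "monitoring_state" == "reopened")) = false := by
          rw [Bool.eq_false_iff]
          intro h
          simp only [List.any_eq_true, Bool.and_eq_true, Bool.or_eq_true, beq_iff_eq, hq, PySem.Set.contains_iff] at h
          exact hR h
        have hRe : PySem.Set.inter (PySem.Set.ofList ((outcome_rows.filter q).map (fun row => pvGet row "monitoring_state"))) (PySem.Set.ofList ["drift-returned", "reopened"]) = [] := by
          rw [pvInter_eq_nil_iff]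
          intro r hr h1 h2
          exact hR ⟨r, hr, by simpa [hq] using h1, by simpa using h2⟩
        by_cases hH : ∃ x ∈ outcome_rows, pvGet x "campaign_type" ∈ rc ∧ pvGet x "monitoring_state" = "holding-clean"
        · have bH : (outcome_rows.any fun r => q r && (pvGet r "monitoring_state" == "holding-clean")) = true := by
            simp only [List.any_eq_true, Bool.and_eq_true, beq_iff_eq, hq, PySem.Set.contains_iff]
            exact hH
          have hHm : "holding-clean" ∈ PySem.Set.ofList ((outcome_rows.filter q).map (fun row => pvGet row "monitoring_state")) := by
            rw [pvMem_states_iff]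
            obtain ⟨r, hr, h1, h2⟩ := hH
            exact ⟨r, hr, by simpa [hq] using h1, h2⟩
          by_cases hB : ∃ x ∈ outcome_rows, pvGet x "campaign_type" ∈ rc ∧ (pvGet x "monitoring_state" = "rollback-watch" ∨ pvGet x "monitoring_state" = "monitor-now")
          · have bB : (outcome_rows.any fun r => q r && (pvGet r "monitoring_state" == "rollback-watch" || pvGet r "monitoring_state" == "monitor-now")) = true := by
              simp only [List.any_eq_true, Bool.and_eq_true, Bool.or_eq_true, beq_iff_eq, hq, PySem.Set.contains_iff]
              exact hB
            have hBne : PySem.Set.inter (PySem.Set.ofList ((outcome_rows.filter q).map (fun row => pvGet row "monitoring_state"))) (PySem.Set.ofList ["rollback-watch", "monitor-now"]) ≠ [] := by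
              rw [ne_eq, pvInter_eq_nil_iff]
              obtain ⟨r, hr, h1, h2⟩ := hB
              intro hall
              exact hall r hr (by simpa [hq] using h1) (by rcases h2 with h | h <;> simp [h])
            rw [if_neg hrel, if_neg (not_not_intro hRe), if_neg (fun hc => hBne hc.2), if_pos hSne,
              bR, bH, bB, pvTarget_M, pvVerdict_M]
          · have bB : (outcome_rows.any fun r => q r && (pvGet r "monitoring_state" == "rollback-watch" || pvGet r "monitoring_state" == "monitor-now")) = false := by
              rw [Bool.eq_false_iff]
              intro h
              simp only [List.any_eq_true, Bool.and_eq_true, Bool.or_eq_true, beq_iff_eq, hq, PySem.Set.contains_iff] at h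
              exact hB h
            have hBe : PySem.Set.inter (PySem.Set.ofList ((outcome_rows.filter q).map (fun row => pvGet row "monitoring_state"))) (PySem.Set.ofList ["rollback-watch", "monitor-now"]) = [] := by
              rw [pvInter_eq_nil_iff]
              intro r hr h1 h2
              exact hB ⟨r, hr, by simpa [hq] using h1, by simpa using h2⟩
            rw [if_neg hrel, if_neg (not_not_intro hRe), if_pos ⟨hHm, hBe⟩,
              bR, bH, bB, pvTarget_H, pvVerdict_H]
        · have bH : (outcome_rows.any fun r => q r && (pvGet r "monitoring_state" == "holding-clean")) = false := by
            rw [Bool.eq_false_iff]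
            intro h
            simp only [List.any_eq_true, Bool.and_eq_true, beq_iff_eq, hq, PySem.Set.contains_iff] at h
            exact hH h
          have hHnm : "holding-clean" ∉ PySem.Set.ofList ((outcome_rows.filter q).map (fun row => pvGet row "monitoring_state")) := by
            rw [pvMem_states_iff]
            rintro ⟨r, hr, h1, h2⟩
            exact hH ⟨r, hr, by simpa [hq] using h1, h2⟩
          by_cases hB : ∃ x ∈ outcome_rows, pvGet x "campaign_type" ∈ rc ∧ (pvGet x "monitoring_state" = "rollback-watch" ∨ pvGet x "monitoring_state" = "monitor-now")
          · have bB : (outcome_rows.any fun r => q r && (pvGet r "monitoring_state" == "rollback-watch" || pvGet r "monitoring_state" == "monitor-now")) = true := by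
              simp only [List.any_eq_true, Bool.and_eq_true, Bool.or_eq_true, beq_iff_eq, hq, PySem.Set.contains_iff]
              exact hB
            rw [if_neg hrel, if_neg (not_not_intro hRe), if_neg (fun hc => hHnm hc.1), if_pos hSne,
              bR, bH, bB, pvTarget_B, pvVerdict_B]
          · have bB : (outcome_rows.any fun r => q r && (pvGet r "monitoring_state" == "rollback-watch" || pvGet r "monitoring_state" == "monitor-now")) = false := by
              rw [Bool.eq_false_iff]
              intro h
              simp only [List.any_eq_true, Bool.and_eq_true, Bool.or_eq_true, beq_iff_eq, hq, PySem.Set.contains_iff] at h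
              exact hB h
            rw [if_neg hrel, if_neg (not_not_intro hRe), if_neg (fun hc => hHnm hc.1), if_pos hSne,
              bR, bH, bB, bA, pvTarget_O, pvVerdict_O]
    · have bA : outcome_rows.any q = false := by
        rw [Bool.eq_false_iff]
        intro h
        simp only [List.any_eq_true, hq, PySem.Set.contains_iff] at h
        exact hA h
      have hrel : outcome_rows.filter q = [] := by
        rw [List.filter_eq_nil_iff]
        intro r hr h
        simp only [hq, PySem.Set.contains_iff] at h
        exact hA ⟨r, hr, h⟩
      have bR : (outcome_rows.any fun r => q r && (pvGet r "monitoring_state" == "drift-returned" || pvGet r "monitoring_state" == "reopened")) = false := by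
        rw [Bool.eq_false_iff]
        intro h
        simp only [List.any_eq_true, Bool.and_eq_true, Bool.or_eq_true, beq_iff_eq, hq, PySem.Set.contains_iff] at h
        obtain ⟨r, hr, h1, _⟩ := h
        exact hA ⟨r, hr, h1⟩
      have bH : (outcome_rows.any fun r => q r && (pvGet r "monitoring_state" == "holding-clean")) = false := by
        rw [Bool.eq_false_iff]
        intro h
        simp only [List.any_eq_true, Bool.and_eq_true, beq_iff_eq, hq, PySem.Set.contains_iff] at h
        obtain ⟨r, hr, h1, _⟩ := h
        exact hA ⟨r, hr, h1⟩
      have bB : (outcome_rows.any fun r => q r && (pvGet r "monitoring_state" == "rollback-watch" || pvGet r "monitoring_state" == "monitor-now")) = false := by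
        rw [Bool.eq_false_iff]
        intro h
        simp only [List.any_eq_true, Bool.and_eq_true, Bool.or_eq_true, beq_iff_eq, hq, PySem.Set.contains_iff] at h
        obtain ⟨r, hr, h1, _⟩ := h
        exact hA ⟨r, hr, h1⟩
      rw [if_pos hrel, bR, bH, bB, bA, pvTarget_N, pvVerdict_N]
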